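-- pv_equiv track=rewrite | github.com/lmbaeza/Crypto | algorithms/algorithms_playfair_cipher.py | is_same_col
-- ===== SOURCE A (Python) =====
-- KEYS = [
--     "IVANC",
--     "BDEFG",
--     "HKLMO",
--     "PQRST",
--     "UWXYZ"
-- ]
--
-- def is_same_col(x, y):
--     n = len(KEYS)
--     if n == 0: return False
--     m = len(KEYS[0])
--
--     for j in range(m):
--         is_x, is_y = False, False
--         for i in range(n):
--             if KEYS[i][j] == x:
--                 is_x = True
--             if KEYS[i][j] == y:
--                 is_y = True
--         if is_x and is_y:
--             return True
--     return False
-- ===== SOURCE B (Python) =====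
-- KEYS = [
--     "IVANC",
--     "BDEFG",
--     "HKLMO",
--     "PQRST",
--     "UWXYZ"
-- ]
--
-- def is_same_col(x, y):
--     idx = {}
--     for row in KEYS:
--         for j, ch in enumerate(row):
--             idx[ch] = j
--     return x in idx and idx[x] == idx.get(y)
-- ===== Notes on version B (the rewrite author's own statement) =====
-- stated objective: simpler
-- what changed: Replaces the column-by-column double scan (for each column, scan all rows testing both characters) with a single pass that builds a char-to-column index once and then just compares the two looked-up columns.
import Mathlib
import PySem

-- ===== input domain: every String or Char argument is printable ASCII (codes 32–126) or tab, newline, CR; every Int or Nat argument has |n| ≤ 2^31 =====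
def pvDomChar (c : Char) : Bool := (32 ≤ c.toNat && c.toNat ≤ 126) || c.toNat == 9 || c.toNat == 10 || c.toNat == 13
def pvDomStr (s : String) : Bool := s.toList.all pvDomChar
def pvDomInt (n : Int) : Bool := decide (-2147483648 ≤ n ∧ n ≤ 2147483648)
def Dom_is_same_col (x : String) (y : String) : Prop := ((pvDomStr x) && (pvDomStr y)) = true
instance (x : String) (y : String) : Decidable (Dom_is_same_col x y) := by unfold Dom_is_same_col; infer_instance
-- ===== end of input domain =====

-- B builds a char->column index once and compares the two looked-up columns, instead of A's
-- per-column joint membership scan (objective: simpler; same cost).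


-- ===== PORT A =====
def keysA : List String := ["IVANC", "BDEFG", "HKLMO", "PQRST", "UWXYZ"]

-- KEYS[i][j] == x : the grid cell (a one-character Python string) compared with the string x
def cellEq (i j : Int) (x : String) : Bool :=
  match PySem.Str.pyGet? (PySem.List.pyGetD keysA i "") j with
  | some c => String.ofList [c] == x
  | none => false

def is_same_col (x : String) (y : String) : Bool :=
  let n : Int := keysA.length
  if n == 0 then false
  else
    let m : Int := PySem.Str.len (PySem.List.pyGetD keysA 0 "")
    -- for j in range(m): … ; the early 'return True' becomes an or-accumulator
    (PySem.List.pyRange 0 m 1).foldl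
      (fun found j =>
        let st :=
          (PySem.List.pyRange 0 n 1).foldl
            (fun (st : Bool × Bool) i =>
              let st := if cellEq i j x then (true, st.2) else st
              if cellEq i j y then (st.1, true) else st)
            (false, false)
        found || (st.1 && st.2))
      false

-- ===== PORT B =====
-- idx = {}; for row in KEYS: for j, ch in enumerate(row): idx[ch] = j
def idxB : PySem.Dict String Int :=
  keysA.foldl
    (fun d row =>
      (PySem.List.enumerate row.toList 0).foldl
        (fun d p => d.insert (String.ofList [p.2]) p.1) d)
    PySem.Dict.empty

def is_same_col_alt (x : String) (y : String) : Bool :=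
  idxB.contains x && (idxB.get? x == idxB.get? y)

-- ===== PRECONDITION & SPEC =====
def Spec_is_same_col (x : String) (y : String) (out : Bool) : Prop := out = is_same_col_alt x y
instance (x : String) (y : String) (out : Bool) : Decidable (Spec_is_same_col x y out) := by unfold Spec_is_same_col; infer_instance

-- ===== CLAIM (what is proved, stated in full; the proofs are below) =====
def Claim_equal_is_same_col : Prop := ∀ (x : String) (y : String), Dom_is_same_col x y → Spec_is_same_col x y (is_same_col x y)

-- ===== LEMMAS AND PROOFS =====

-- the 25 grid characters, and the same as one-character strings
def bigChars : List Char :=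
  ['I','V','A','N','C','B','D','E','F','G','H','K','L','M','O','P','Q','R','S','T','U','W','X','Y','Z']

def litsG : List String :=
  ["I","V","A","N","C","B","D","E","F","G","H","K","L","M","O","P","Q","R","S","T","U","W","X","Y","Z"]

lemma litsG_eq : litsG = bigChars.map (fun c => String.ofList [c]) := rfl

lemma grid_chars_lits (c : Char) (hc : c ∈ bigChars) : String.ofList [c] ∈ litsG := by
  rw [litsG_eq]; exact List.mem_map_of_mem hc

-- a string outside the grid matches no cell
lemma cellEq_false (z : String) (hz : z ∉ litsG) (i j : Int) : cellEq i j z = false := by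
  unfold cellEq
  by_cases hin : PySem.Raise.InRange keysA.length i
  · have hrow := PySem.List.pyGetD_mem keysA "" hin
    generalize hg : PySem.List.pyGetD keysA i "" = r at hrow ⊢
    cases h : PySem.Str.pyGet? r j with
    | none => rfl
    | some c =>
      have hc : c ∈ r.toList := PySem.List.mem_of_pyGet?_eq_some _ h
      have hsub : r.toList ⊆ bigChars := by
        clear h hc hg; fin_cases hrow <;> decide
      exact beq_eq_false_iff_ne.mpr (fun hh => hz (hh ▸ grid_chars_lits c (hsub hc)))
  · have he : PySem.List.pyGetD keysA i "" = "" := by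
      simp [PySem.List.pyGetD, (PySem.List.pyGet?_eq_none_iff keysA i).mpr hin]
    rw [he]
    cases h : PySem.Str.pyGet? "" j with
    | none => rfl
    | some c => exact absurd (PySem.List.mem_of_pyGet?_eq_some _ h) (by simp)

-- the inner row scan never sets the is_y flag when y matches no cell
lemma inner_snd (x y : String) (hy : ∀ i j, cellEq i j y = false) (j : Int) (l : List Int)
    (st : Bool × Bool) :
    (l.foldl
      (fun (st : Bool × Bool) i =>
        let st := if cellEq i j x then (true, st.2) else st
        if cellEq i j y then (st.1, true) else st)
      st).2 = st.2 := by
  induction l generalizing st with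
  | nil => rfl
  | cons a l ih =>
    simp only [List.foldl, hy a j, Bool.false_eq_true, if_false]
    rw [ih]
    split <;> rfl

-- nor the is_x flag when x matches no cell
lemma inner_fst (x y : String) (hx : ∀ i j, cellEq i j x = false) (j : Int) (l : List Int)
    (st : Bool × Bool) :
    (l.foldl
      (fun (st : Bool × Bool) i =>
        let st := if cellEq i j x then (true, st.2) else st
        if cellEq i j y then (st.1, true) else st)
      st).1 = st.1 := by
  induction l generalizing st with
  | nil => rfl
  | cons a l ih =>
    simp only [List.foldl, hx a j, Bool.false_eq_true, if_false]
    rw [ih]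
    split <;> rfl

-- an or-fold of a pointwise-false column test stays false
lemma foldl_or_false (l : List Int) (g : Int → Bool) (hg : ∀ j, g j = false) :
    l.foldl (fun found j => found || g j) false = false := by
  induction l with
  | nil => rfl
  | cons a l ih => simpa [List.foldl, hg a] using ih

lemma A_false_left (x y : String) (hx : x ∉ litsG) : is_same_col x y = false := by
  unfold is_same_col
  simp only [show ((keysA.length : Int) == 0) = false from by decide, Bool.false_eq_true, if_false]
  exact foldl_or_false _ _ (fun j => by
    rw [inner_fst x y (cellEq_false x hx) j]
    rfl)

lemma A_false_right (x y : String) (hy : y ∉ litsG) : is_same_col x y = false := by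
  unfold is_same_col
  simp only [show ((keysA.length : Int) == 0) = false from by decide, Bool.false_eq_true, if_false]
  exact foldl_or_false _ _ (fun j => by
    rw [inner_snd x y (cellEq_false y hy) j]
    simp)

-- a string outside the grid is not a key of B's index
lemma idxB_get?_none (z : String) (hz : z ∉ litsG) : idxB.get? z = none := by
  have hk : idxB.keys = litsG := by decide
  rw [PySem.Dict.get?_eq_none_iff_not_mem_keys, hk]
  exact hz

lemma B_false_left (x y : String) (hx : x ∉ litsG) : is_same_col_alt x y = false := by
  unfold is_same_col_alt
  rw [PySem.Dict.contains_eq_isSome_get?, idxB_get?_none x hx]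
  rfl

lemma B_false_right (x y : String) (hy : y ∉ litsG) : is_same_col_alt x y = false := by
  unfold is_same_col_alt
  rw [PySem.Dict.contains_eq_isSome_get?, idxB_get?_none y hy]
  cases idxB.get? x <;> simp

-- on grid strings the two ports agree (a finite check)
set_option maxRecDepth 8192 in
lemma grid_agree : ∀ x ∈ litsG, ∀ y ∈ litsG, is_same_col x y = is_same_col_alt x y := by
  decide

-- ===== VERDICT (by name: the statement is the Claim_ definition above) =====
theorem is_same_col_spec : Claim_equal_is_same_col := by
  intro x y _
  show is_same_col x y = is_same_col_alt x y
  by_cases hx : x ∈ litsG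
  · by_cases hy : y ∈ litsG
    · exact grid_agree x hx y hy
    · rw [A_false_right x y hy, B_false_right x y hy]
  · rw [A_false_left x y hx, B_false_left x y hx]
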